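-- pv_equiv track=rewrite | github.com/marvosyntactical/joeynmt | data/scripts_kvr/parse_kvr_json.py | historify_src
-- ===== SOURCE A (Python) =====
-- DOT_CHAR = "@DOT"
--
-- def historify_src(utterances, even=True):
--     #helper function to add the entire dialogue history as src
--     parity = 0 if even else 1
--
--     assert set([bool(utt.strip()) == True for utt in utterances]) == {True}, utterances
--
--     usr_part = ""
--     for i, e in enumerate(utterances):
--         if i%2==parity:
--             usr_part += f" {DOT_CHAR} ".join(utterances[:i+1])+"\n"
--     return usr_part
-- ===== SOURCE B (Python) =====
-- DOT_CHAR = "@DOT"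
--
-- def historify_src(utterances, even=True):
--     # incremental decomposition: maintain the cumulative history prefix instead of
--     # re-joining utterances[:i+1] each iteration; collect parts, join once
--     parity = 0 if even else 1
--
--     assert set([bool(utt.strip()) == True for utt in utterances]) == {True}, utterances
--
--     parts = []
--     prefix = ""
--     for i, e in enumerate(utterances):
--         prefix = e if i == 0 else prefix + f" {DOT_CHAR} " + e
--         if i % 2 == parity:
--             parts.append(prefix + "\n")
--     return "".join(parts)
-- ===== Notes on version B (the rewrite author's own statement) =====
-- stated objective: alternative
-- what changed: Replaces the per-iteration ' @DOT '.join(utterances[:i+1]) slice-and-rejoin with an incrementally maintained cumulative prefix string, collecting selected lines in a list joined once at the end; same overall cost since the output itself is quadratic in size.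
import Mathlib
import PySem

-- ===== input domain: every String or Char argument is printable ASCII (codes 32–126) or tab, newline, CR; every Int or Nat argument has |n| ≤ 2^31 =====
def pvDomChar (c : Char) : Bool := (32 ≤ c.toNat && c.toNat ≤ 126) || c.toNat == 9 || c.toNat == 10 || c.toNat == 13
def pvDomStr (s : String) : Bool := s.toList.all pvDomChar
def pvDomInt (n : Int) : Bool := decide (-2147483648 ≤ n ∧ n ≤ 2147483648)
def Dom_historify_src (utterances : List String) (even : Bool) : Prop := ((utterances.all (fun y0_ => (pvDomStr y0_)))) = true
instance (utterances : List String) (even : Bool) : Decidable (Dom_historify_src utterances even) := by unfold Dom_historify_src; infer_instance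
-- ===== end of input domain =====

-- B replaces the per-iteration ' @DOT '.join(utterances[:i+1]) slice-and-rejoin by an incrementally
-- maintained cumulative prefix and a parts list joined once (alternative decomposition, same cost;
-- equal return values on Pre_).

-- ===== PORT A =====
def historify_src (utterances : List String) (even : Bool) : String :=
  let parity : Int := if even then 0 else 1
  (PySem.List.enumerate utterances).foldl
    (fun usr_part ie =>
      if PySem.Int.mod ie.1 2 == parity then
        usr_part ++ PySem.Str.join " @DOT " (PySem.List.slice utterances none (some (ie.1 + 1))) ++ "\n"
      else usr_part) ""

-- ===== PORT B =====
def historify_src_alt (utterances : List String) (even : Bool) : String :=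
  let parity : Int := if even then 0 else 1
  let st := (PySem.List.enumerate utterances).foldl
    (fun (st : String × List String) ie =>
      let pre := if ie.1 == 0 then ie.2 else st.1 ++ " @DOT " ++ ie.2
      (pre, if PySem.Int.mod ie.1 2 == parity then st.2 ++ [pre ++ "\n"] else st.2))
    ("", [])
  PySem.Str.join "" st.2

-- ===== PRECONDITION & SPEC =====
-- Pre_ excludes exactly the inputs on which A's assert fails (AssertionError):
-- the empty list and lists containing a whitespace-only utterance.
def Pre_historify_src (utterances : List String) (even : Bool) : Prop :=
  utterances ≠ [] ∧ ∀ u ∈ utterances, PySem.Str.strip u ≠ ""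
instance (utterances : List String) (even : Bool) : Decidable (Pre_historify_src utterances even) := by unfold Pre_historify_src; infer_instance

def pvWitness_historify_src : List String × Bool := (["hi", "there boss", "ok"], true)

def Spec_historify_src (utterances : List String) (even : Bool) (out : String) : Prop := out = historify_src_alt utterances even
instance (utterances : List String) (even : Bool) (out : String) : Decidable (Spec_historify_src utterances even out) := by unfold Spec_historify_src; infer_instance

-- ===== CLAIM (what is proved, stated in full; the proofs are below) =====
def Claim_equal_historify_src : Prop := ∀ (utterances : List String) (even : Bool), Dom_historify_src utterances even → Pre_historify_src utterances even → Spec_historify_src utterances even (historify_src utterances even)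

-- ===== LEMMAS AND PROOFS =====

theorem pv_chars_join_concat (sep x : List Char) (ps : List (List Char)) (h : ps ≠ []) :
    PySem.Chars.join sep (ps ++ [x]) = PySem.Chars.join sep ps ++ sep ++ x := by
  induction ps with
  | nil => simp at h
  | cons a rest ih =>
    cases rest with
    | nil => simp [PySem.Chars.join_singleton, PySem.Chars.join_cons_cons]
    | cons b r =>
      have := ih (by simp)
      simp only [List.cons_append, PySem.Chars.join_cons_cons] at *
      cases h' : r ++ [x] with
      | nil => simp at h'
      | cons c t => rw [← h', this]; simp

theorem pv_join_sep_concat (sep : String) (us : List String) (x : String) (h : us ≠ []) :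
    PySem.Str.join sep (us ++ [x]) = PySem.Str.join sep us ++ sep ++ x := by
  rw [← String.toList_inj]
  simp only [PySem.Str.toList_join, String.toList_append, List.map_append, List.map_cons,
    List.map_nil]
  rw [pv_chars_join_concat _ _ _ (by simpa using h)]

theorem pv_join_empty_concat (ys : List String) (y : String) :
    PySem.Str.join "" (ys ++ [y]) = PySem.Str.join "" ys ++ y := by
  cases ys with
  | nil =>
    rw [← String.toList_inj]
    simp [PySem.Str.toList_join, PySem.Chars.join_singleton, PySem.Chars.join_nil]
  | cons a t =>
    rw [pv_join_sep_concat _ _ _ (by simp), ← String.toList_inj]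
    simp

theorem pv_join_singleton (y : String) : PySem.Str.join " @DOT " [y] = y := by
  rw [← String.toList_inj]
  simp [PySem.Str.toList_join, PySem.Chars.join_singleton]

theorem pv_join_nil (sep : String) : PySem.Str.join sep [] = "" := by
  rw [← String.toList_inj]
  simp [PySem.Str.toList_join, PySem.Chars.join_nil]

theorem pv_slice_full {α : Type} (xs : List α) (x : α) :
    PySem.List.slice (xs ++ [x]) none (some ((xs.length : Int) + 1)) = xs ++ [x] := by
  rw [PySem.List.slice_to _ (by omega)]
  have h1 : ((xs.length : Int) + 1).toNat = xs.length + 1 := by omega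
  rw [h1]
  exact List.take_of_length_le (by simp)

theorem pv_slice_prefix {α : Type} (xs : List α) (x : α) (k : Nat) (hk : k < xs.length) :
    PySem.List.slice (xs ++ [x]) none (some ((k : Int) + 1)) =
      PySem.List.slice xs none (some ((k : Int) + 1)) := by
  rw [PySem.List.slice_to _ (by omega), PySem.List.slice_to _ (by omega)]
  have h1 : ((k : Int) + 1).toNat = k + 1 := by omega
  rw [h1, List.take_append_of_le_length (by omega)]

-- A's fold over the first us elements sees the same slices whether the full list is us or us ++ [x]
theorem pv_A_stable (us : List String) (x : String) (p : Int) :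
    (PySem.List.enumerate us 0).foldl
        (fun usr_part ie =>
          if PySem.Int.mod ie.1 2 == p then
            usr_part ++ PySem.Str.join " @DOT "
              (PySem.List.slice (us ++ [x]) none (some (ie.1 + 1))) ++ "\n"
          else usr_part) "" =
    (PySem.List.enumerate us 0).foldl
        (fun usr_part ie =>
          if PySem.Int.mod ie.1 2 == p then
            usr_part ++ PySem.Str.join " @DOT "
              (PySem.List.slice us none (some (ie.1 + 1))) ++ "\n"
          else usr_part) "" := by
  apply PySem.List.foldl_congr_mem
  intro acc q hq
  rw [PySem.List.mem_enumerate_iff] at hq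
  obtain ⟨k, hk, rfl⟩ := hq
  simp only [zero_add]
  rw [pv_slice_prefix _ _ _ hk]

theorem pv_main (utterances : List String) (p : Int) :
    ((PySem.List.enumerate utterances).foldl
        (fun (st : String × List String) ie =>
          let pre := if ie.1 == 0 then ie.2 else st.1 ++ " @DOT " ++ ie.2
          (pre, if PySem.Int.mod ie.1 2 == p then st.2 ++ [pre ++ "\n"] else st.2))
        ("", [])).1 = PySem.Str.join " @DOT " utterances ∧
    PySem.Str.join "" ((PySem.List.enumerate utterances).foldl
        (fun (st : String × List String) ie =>
          let pre := if ie.1 == 0 then ie.2 else st.1 ++ " @DOT " ++ ie.2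
          (pre, if PySem.Int.mod ie.1 2 == p then st.2 ++ [pre ++ "\n"] else st.2))
        ("", [])).2 =
      (PySem.List.enumerate utterances).foldl
        (fun usr_part ie =>
          if PySem.Int.mod ie.1 2 == p then
            usr_part ++ PySem.Str.join " @DOT " (PySem.List.slice utterances none (some (ie.1 + 1))) ++ "\n"
          else usr_part) "" := by
  induction utterances using List.reverseRecOn with
  | nil =>
    constructor
    · simp [PySem.List.enumerate_nil, pv_join_nil]
    · simp [PySem.List.enumerate_nil, pv_join_nil]
  | append_singleton us x ih =>
    obtain ⟨ih1, ih2⟩ := ih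
    rw [PySem.List.enumerate_append]
    simp only [PySem.List.enumerate_cons, PySem.List.enumerate_nil, List.foldl_append,
      List.foldl_cons, List.foldl_nil, zero_add]
    rw [pv_A_stable us x p]
    have hpre : (if ((us.length : Int) == 0) = true then x else
        ((PySem.List.enumerate us 0).foldl
          (fun (st : String × List String) ie =>
            let pre := if ie.1 == 0 then ie.2 else st.1 ++ " @DOT " ++ ie.2
            (pre, if PySem.Int.mod ie.1 2 == p then st.2 ++ [pre ++ "\n"] else st.2))
          ("", [])).1 ++ " @DOT " ++ x) = PySem.Str.join " @DOT " (us ++ [x]) := by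
      by_cases hus : us = []
      · subst hus
        simp [pv_join_singleton]
      · have hlen : ¬ (((us.length : Int) == 0) = true) := by
          simp [List.length_eq_zero_iff, hus]
        rw [if_neg hlen, ih1, pv_join_sep_concat _ _ _ hus]
    constructor
    · exact hpre
    · by_cases hc : (PySem.Int.mod (us.length : Int) 2 == p) = true
      · rw [if_pos hc, if_pos hc, pv_join_empty_concat, ih2, pv_slice_full us x, ← hpre]
        exact String.append_assoc.symm
      · rw [if_neg hc, if_neg hc]
        exact ih2

-- ===== VERDICT (by name: the statement is the Claim_ definition above) =====
theorem historify_src_spec : Claim_equal_historify_src := by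
  intro us even _ _
  unfold Spec_historify_src historify_src historify_src_alt
  exact ((pv_main us (if even then 0 else 1)).2).symm
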